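-- pv_equiv track=rewrite | github.com/edgar-323/LeetCode_Java | exercises/AllocateMailboxes/CalculateTotalDistanceToClosestMailBox.py | calculateTotalDistanceToClosestMailbox
-- ===== SOURCE A (Python) =====
-- from math import inf as INFINITY
--
-- def calculateTotalDistanceToClosestMailbox(houses, mailboxes):
--     totalDist = 0
--     for house in houses:
--         minDist = INFINITY
--         for mailbox in mailboxes:
--             minDist = min(minDist, abs(house - mailbox))
--         totalDist += minDist
--     return totalDist
-- ===== SOURCE B (Python) =====
-- def calculateTotalDistanceToClosestMailbox(houses, mailboxes):
--     # Sort mailboxes once, then binary-search the nearest mailbox per house: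
--     # O((H+M) log M) instead of A's O(H*M).
--     ms = sorted(mailboxes)
--     n = len(ms)
--     total = 0
--     for h in houses:
--         lo, hi = 0, n
--         while lo < hi:
--             mid = (lo + hi) // 2
--             if ms[mid] < h:
--                 lo = mid + 1
--             else:
--                 hi = mid
--         best = None
--         if lo < n:
--             best = ms[lo] - h
--         if lo > 0 and (best is None or h - ms[lo - 1] < best):
--             best = h - ms[lo - 1]
--         total += best
--     return total
-- ===== Notes on version B (the rewrite author's own statement) =====
-- stated objective: faster
-- what changed: B sorts the mailboxes once and binary-searches the insertion point per house (nearest mailbox is one of the two neighbours), replacing A's inner linear scan over all mailboxes.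
-- outside the precondition, e.g. on calculateTotalDistanceToClosestMailbox([0], []): A returns inf, B raises TypeError
import Mathlib
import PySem

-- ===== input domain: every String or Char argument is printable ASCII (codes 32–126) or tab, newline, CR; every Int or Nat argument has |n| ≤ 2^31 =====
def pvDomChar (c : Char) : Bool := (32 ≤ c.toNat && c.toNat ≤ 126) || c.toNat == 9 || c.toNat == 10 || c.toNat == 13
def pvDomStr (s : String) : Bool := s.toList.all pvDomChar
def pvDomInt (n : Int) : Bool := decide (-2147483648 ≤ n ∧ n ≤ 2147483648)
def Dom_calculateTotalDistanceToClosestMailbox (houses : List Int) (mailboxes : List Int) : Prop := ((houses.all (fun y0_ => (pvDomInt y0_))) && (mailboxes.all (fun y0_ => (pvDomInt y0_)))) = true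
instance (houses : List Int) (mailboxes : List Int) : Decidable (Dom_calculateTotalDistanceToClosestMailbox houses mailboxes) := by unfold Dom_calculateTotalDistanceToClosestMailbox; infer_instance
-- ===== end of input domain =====

-- B sorts the mailboxes once and binary-searches the nearest mailbox per house (faster: O((H+M) log M) vs A's O(H*M)).

-- ===== PORT A =====
-- inner loop: minDist starts at float('inf') (= none); min(inf, x) = x
def pvAInner (h : Int) (mailboxes : List Int) : Option Int :=
  mailboxes.foldl
    (fun minDist mailbox =>
      some (match minDist with
            | none => |h - mailbox|
            | some v => min v |h - mailbox|))
    none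

def calculateTotalDistanceToClosestMailbox (houses : List Int) (mailboxes : List Int) : Int :=
  houses.foldl (fun totalDist house => totalDist + (pvAInner house mailboxes).getD 0) 0

-- ===== PORT B =====
-- Source B's hand-written lo/hi binary-search loop is exactly PySem.List.bisectLeft's loop
-- (mid = (lo+hi)//2; ms[mid] < h → lo = mid+1 else hi = mid), so it is ported as that primitive.
def pvBBest (ms : List Int) (h : Int) : Option Int :=
  let lo := PySem.List.bisectLeft ms h
  let best : Option Int := if lo < ms.length then some (ms.getD lo 0 - h) else none
  if decide (0 < lo) && best.elim true (fun b => decide (h - ms.getD (lo - 1) 0 < b)) then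
    some (h - ms.getD (lo - 1) 0)
  else best

def calculateTotalDistanceToClosestMailbox_alt (houses : List Int) (mailboxes : List Int) : Int :=
  let ms := PySem.List.sorted mailboxes (fun x => x) false
  houses.foldl (fun total h => total + (pvBBest ms h).getD 0) 0

-- ===== PRECONDITION & SPEC =====
-- Pre_ excludes nonempty houses with an empty mailbox list: there A's minDist stays float('inf')
-- and A returns a float (not an int), while B raises TypeError.
def Pre_calculateTotalDistanceToClosestMailbox (houses : List Int) (mailboxes : List Int) : Prop :=
  houses = [] ∨ mailboxes ≠ []
instance (houses : List Int) (mailboxes : List Int) : Decidable (Pre_calculateTotalDistanceToClosestMailbox houses mailboxes) := by unfold Pre_calculateTotalDistanceToClosestMailbox; infer_instance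

def pvWitness_calculateTotalDistanceToClosestMailbox : List Int × List Int := ([1, 7, -4], [3, 0])

def Spec_calculateTotalDistanceToClosestMailbox (houses : List Int) (mailboxes : List Int) (out : Int) : Prop := out = calculateTotalDistanceToClosestMailbox_alt houses mailboxes
instance (houses : List Int) (mailboxes : List Int) (out : Int) : Decidable (Spec_calculateTotalDistanceToClosestMailbox houses mailboxes out) := by unfold Spec_calculateTotalDistanceToClosestMailbox; infer_instance

-- ===== CLAIM (what is proved, stated in full; the proofs are below) =====
def Claim_equal_calculateTotalDistanceToClosestMailbox : Prop := ∀ (houses : List Int) (mailboxes : List Int), Dom_calculateTotalDistanceToClosestMailbox houses mailboxes → Pre_calculateTotalDistanceToClosestMailbox houses mailboxes → Spec_calculateTotalDistanceToClosestMailbox houses mailboxes (calculateTotalDistanceToClosestMailbox houses mailboxes)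

-- ===== LEMMAS AND PROOFS =====

-- A's inner loop with a some-accumulator is the running min.
theorem pvAInner_some (h : Int) (l : List Int) (v : Int) :
    l.foldl
      (fun minDist mailbox =>
        some (match minDist with
              | none => |h - mailbox|
              | some v => min v |h - mailbox|))
      (some v)
    = some (l.foldl (fun w m => min w |h - m|) v) := by
  induction l generalizing v with
  | nil => rfl
  | cons m t ih => simp [List.foldl, ih]

-- A's inner loop computes min(map |h-·| l) for nonempty l.
theorem pvAInner_eq_min? (h : Int) (l : List Int) (hl : l ≠ []) :
    pvAInner h l = PySem.List.min? (l.map (fun m => |h - m|)) (fun y => y) := by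
  cases l with
  | nil => exact absurd rfl hl
  | cons m t =>
    simp only [pvAInner, List.foldl, List.map]
    rw [pvAInner_some, PySem.List.min?_id_cons, List.foldl_map]

-- min? with identity key is determined by membership and minimality, hence permutation-invariant.
theorem pvMin?_perm (l l' : List Int) (hp : l.Perm l') :
    PySem.List.min? l (fun y => y) = PySem.List.min? l' (fun y => y) := by
  cases hmin : PySem.List.min? l (fun y => y) with
  | none =>
    rw [PySem.List.min?_eq_none_iff] at hmin
    subst hmin
    rw [(PySem.List.min?_eq_none_iff l' _).mpr (List.Perm.eq_nil hp.symm)]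
  | some m =>
    cases hmin' : PySem.List.min? l' (fun y => y) with
    | none =>
      rw [PySem.List.min?_eq_none_iff] at hmin'
      subst hmin'
      rw [List.Perm.eq_nil hp] at hmin
      simp [PySem.List.min?] at hmin
    | some m' =>
      have h1 := PySem.List.min?_mem hmin
      have h2 := PySem.List.min?_mem hmin'
      have h3 := PySem.List.min?_isMin hmin m' (hp.mem_iff.mpr h2)
      have h4 := PySem.List.min?_isMin hmin' m (hp.mem_iff.mp h1)
      simp only [le_antisymm h3 h4]

-- B's two-candidate choice around the insertion point is the minimum distance over a sorted list.
theorem pvBBest_eq_min? (ms : List Int) (h : Int) (hms : ms ≠ [])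
    (hsorted : List.Pairwise (fun a b => a ≤ b) ms) :
    pvBBest ms h = PySem.List.min? (ms.map (fun m => |h - m|)) (fun y => y) := by
  obtain ⟨hle, hlt, hge⟩ := PySem.List.bisectLeft_spec ms h hsorted
  have hmono : ∀ (i j : Nat) (hi : i < ms.length) (hj : j < ms.length), i ≤ j → ms[i] ≤ ms[j] := by
    intro i j hi hj hij
    rcases Nat.lt_or_eq_of_le hij with hlt' | rfl
    · exact (List.pairwise_iff_getElem.mp hsorted) i j hi hj hlt'
    · exact le_refl _
  set lo := PySem.List.bisectLeft ms h with hlo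
  have hn : 0 < ms.length := List.length_pos_iff.mpr hms
  -- the value b that pvBBest returns
  obtain ⟨b, hb_eq, hb_mem, hb_min⟩ :
      ∃ b, pvBBest ms h = some b ∧ b ∈ ms.map (fun m => |h - m|) ∧
        ∀ y ∈ ms.map (fun m => |h - m|), b ≤ y := by
    have habs_lt : ∀ (j : Nat) (hj : j < ms.length), j < lo → |h - ms[j]| = h - ms[j] := by
      intro j hj hjlo
      have := hlt j hj hjlo
      rw [abs_of_pos]
      omega
    have habs_ge : ∀ (j : Nat) (hj : j < ms.length), lo ≤ j → |h - ms[j]| = ms[j] - h := by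
      intro j hj hjlo
      have := hge j hj hjlo
      rw [abs_of_nonpos]
      · ring
      · omega
    -- the uniform bound step: any b lying below both neighbour candidates is minimal
    have hboundall : ∀ b : Int,
        (0 < lo → b ≤ h - ms[lo - 1]'(by omega)) →
        (∀ hlt' : lo < ms.length, b ≤ ms[lo]'hlt' - h) →
        ∀ y ∈ ms.map (fun m => |h - m|), b ≤ y := by
      intro b hb1 hb2 y hy
      obtain ⟨m, hm, rfl⟩ := List.mem_map.mp hy
      obtain ⟨j, hj, rfl⟩ := List.mem_iff_getElem.mp hm
      by_cases hjlo : j < lo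
      · rw [habs_lt j hj hjlo]
        have h1 := hb1 (by omega)
        have h2 := hmono j (lo - 1) hj (by omega) (by omega)
        omega
      · rw [habs_ge j hj (by omega)]
        have h1 := hb2 (by omega)
        have h2 := hmono lo j (by omega) hj (by omega)
        omega
    by_cases hlon : lo < ms.length
    · have hgetD : ms.getD lo 0 = ms[lo] := List.getD_eq_getElem ms 0 hlon
      by_cases hlo0 : 0 < lo
      · have hgetD1 : ms.getD (lo - 1) 0 = ms[lo - 1]'(by omega) :=
          List.getD_eq_getElem ms 0 (by omega)
        have ho1 : ms[lo - 1]?.getD 0 = ms[lo - 1]'(by omega) := by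
          rw [List.getElem?_eq_getElem (by omega)]
          rfl
        by_cases hcmp : h - ms.getD (lo - 1) 0 < ms.getD lo 0 - h
        · rw [hgetD1, hgetD] at hcmp
          refine ⟨h - ms[lo - 1]'(by omega), ?_, ?_, ?_⟩
          · simp only [pvBBest]
            rw [← hlo]
            simp [hlon, hlo0, ho1, hcmp]
          · rw [← habs_lt (lo - 1) (by omega) (by omega)]
            exact List.mem_map.mpr ⟨_, List.getElem_mem _, rfl⟩
          · exact hboundall _ (fun _ => le_refl _) (fun h' => by omega)
        · rw [hgetD1, hgetD] at hcmp
          refine ⟨ms[lo] - h, ?_, ?_, ?_⟩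
          · simp only [pvBBest]
            rw [← hlo]
            simp [hlon, hlo0, ho1, hcmp]
          · rw [← habs_ge lo hlon (le_refl _)]
            exact List.mem_map.mpr ⟨_, List.getElem_mem _, rfl⟩
          · exact hboundall _ (fun _ => by omega) (fun h' => le_refl _)
      · refine ⟨ms[lo] - h, ?_, ?_, ?_⟩
        · simp only [pvBBest]
          rw [← hlo]
          simp [hlon, hlo0]
        · rw [← habs_ge lo hlon (le_refl _)]
          exact List.mem_map.mpr ⟨_, List.getElem_mem _, rfl⟩
        · exact hboundall _ (fun h' => by omega) (fun h' => le_refl _)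
    · -- lo = length: every mailbox is below h, the last one is nearest
      have hlo0 : 0 < lo := by omega
      have hgetD1 : ms.getD (lo - 1) 0 = ms[lo - 1]'(by omega) :=
        List.getD_eq_getElem ms 0 (by omega)
      have ho1 : ms[lo - 1]?.getD 0 = ms[lo - 1]'(by omega) := by
        rw [List.getElem?_eq_getElem (by omega)]
        rfl
      refine ⟨h - ms[lo - 1]'(by omega), ?_, ?_, ?_⟩
      · simp only [pvBBest]
        rw [← hlo]
        simp [hlon, hlo0, ho1]
      · rw [← habs_lt (lo - 1) (by omega) (by omega)]
        exact List.mem_map.mpr ⟨_, List.getElem_mem _, rfl⟩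
      · exact hboundall _ (fun _ => le_refl _) (fun h' => by omega)
  -- conclude by uniqueness of the minimum
  rw [hb_eq]
  cases hmin : PySem.List.min? (ms.map (fun m => |h - m|)) (fun y => y) with
  | none =>
    rw [PySem.List.min?_eq_none_iff] at hmin
    rw [hmin] at hb_mem
    exact absurd hb_mem (List.not_mem_nil)
  | some m =>
    have h1 := PySem.List.min?_isMin hmin b hb_mem
    have h2 := hb_min m (PySem.List.min?_mem hmin)
    simp only [le_antisymm h2 h1]

-- ===== VERDICT (by name: the statement is the Claim_ definition above) =====
theorem calculateTotalDistanceToClosestMailbox_spec : Claim_equal_calculateTotalDistanceToClosestMailbox := by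
  intro houses mailboxes _hdom hpre
  unfold Spec_calculateTotalDistanceToClosestMailbox
  rcases hpre with rfl | hne
  · rfl
  · unfold calculateTotalDistanceToClosestMailbox calculateTotalDistanceToClosestMailbox_alt
    have key : ∀ h : Int,
        pvAInner h mailboxes = pvBBest (PySem.List.sorted mailboxes (fun x => x) false) h := by
      intro h
      have hperm := PySem.List.sorted_perm mailboxes (fun x => x) false
      have hms_ne : PySem.List.sorted mailboxes (fun x => x) false ≠ [] := fun hnil =>
        hne ((PySem.List.sorted_eq_nil_iff mailboxes (fun x => x) false).mp hnil)
      rw [pvAInner_eq_min? h mailboxes hne,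
          pvBBest_eq_min? _ h hms_ne (PySem.List.sorted_pairwise mailboxes (fun x => x)),
          pvMin?_perm _ _ ((hperm.symm).map (fun m => |h - m|))]
    simp only [key]
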